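-- pv_equiv track=rewrite | github.com/stevenkim18/Codyssey_Core | test/5.py | caesar_cipher_decode
-- ===== SOURCE A (Python) =====
-- def caesar_cipher_decode(text):
--     result = []
--
--     for i in range(0, 26):
--         decoded_text = ''
--         for char in text:
--             # 5-1번 문제와 다르게 공백이 있습니다.
--             # 이를 처리하기 위해서 소문자인 것만을 특정해줘야 합니다.
--             if 'a' <= char <= 'z':
--                 # 저는 그냥 문제에서 +i로 풀었는데
--                 # 시험에서는 -i를 하라고 나옵니다. 주의하세요!
--                 num = (ord(char)) - i
--                 if num < 97:
--                     num += 26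
--                 decoded_text += chr(num)
--         result.append(decoded_text)
--
--     return result
-- ===== SOURCE B (Python) =====
-- def caesar_cipher_decode(text):
--     alpha = 'abcdefghijklmnopqrstuvwxyz'
--     step = str.maketrans(alpha, alpha[-1] + alpha[:-1])
--     row = ''.join(c for c in text if 'a' <= c <= 'z')
--     out = []
--     for _ in range(26):
--         out.append(row)
--         row = row.translate(step)
--     return out
-- ===== Notes on version B (the rewrite author's own statement) =====
-- stated objective: faster
-- what changed: B filters the lowercase letters once, then derives each of the 26 decodings incrementally from the previous one via a precomputed rotate-down-one translation table (str.maketrans/translate), instead of A's nested loops recomputing every shift from the original text with per-char branching and string concatenation.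
import Mathlib
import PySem

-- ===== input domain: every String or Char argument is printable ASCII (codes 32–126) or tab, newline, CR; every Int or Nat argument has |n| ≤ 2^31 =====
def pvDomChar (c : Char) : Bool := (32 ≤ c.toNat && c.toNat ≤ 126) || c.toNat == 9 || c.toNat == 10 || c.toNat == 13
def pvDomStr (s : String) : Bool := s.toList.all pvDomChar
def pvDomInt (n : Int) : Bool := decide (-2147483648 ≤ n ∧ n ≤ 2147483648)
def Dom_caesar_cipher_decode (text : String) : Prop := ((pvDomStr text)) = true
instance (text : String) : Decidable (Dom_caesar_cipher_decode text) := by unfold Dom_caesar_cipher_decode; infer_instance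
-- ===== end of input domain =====

-- B filters the lowercase letters once and derives each of the 26 decodings incrementally
-- from the previous one via a precomputed rotate-down-one translation table, instead of
-- A's nested loops recomputing every shift from the original text.

-- ===== PORT A =====
-- literal transliteration of A: outer loop over range(0,26), inner loop over the chars,
-- branch 'a' <= char <= 'z', num = ord(char) - i, wrap with +26 if num < 97.
def caesar_cipher_decode (text : String) : List String :=
  (PySem.List.pyRange 0 26 1).foldl (fun result i =>
    let decoded :=
      text.toList.foldl (fun acc ch =>
        if 'a' ≤ ch ∧ ch ≤ 'z' then
          let num : Int := (ch.toNat : Int) - i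
          let num := if num < 97 then num + 26 else num
          acc ++ [Char.ofNat num.toNat]   -- chr(num): num is a valid lowercase code here
        else acc) []
    result ++ [String.mk decoded]) []

-- ===== PORT B =====
-- str.maketrans(alpha, alpha[-1] + alpha[:-1]): each lowercase letter maps one step down
def pvStepTable : List (Char × Char) :=
  "abcdefghijklmnopqrstuvwxyz".toList.zip ('z' :: "abcdefghijklmnopqrstuvwxyz".toList.dropLast)

-- str.translate applied to one character: table lookup, unmapped characters unchanged
def pvTranslate (c : Char) : Char := (pvStepTable.lookup c).getD c

-- the loop: emit the current row, then translate it to get the next row, 26 times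
def pvRows : Nat → List Char → List String
  | 0, _ => []
  | k+1, row => String.mk row :: pvRows k (row.map pvTranslate)

def caesar_cipher_decode_alt (text : String) : List String :=
  pvRows 26 (text.toList.filter (fun c => decide ('a' ≤ c ∧ c ≤ 'z')))

-- ===== PRECONDITION & SPEC =====
def Spec_caesar_cipher_decode (text : String) (out : List String) : Prop := out = caesar_cipher_decode_alt text
instance (text : String) (out : List String) : Decidable (Spec_caesar_cipher_decode text out) := by unfold Spec_caesar_cipher_decode; infer_instance

-- ===== CLAIM (what is proved, stated in full; the proofs are below) =====
def Claim_equal_caesar_cipher_decode : Prop := ∀ (text : String), Dom_caesar_cipher_decode text → Spec_caesar_cipher_decode text (caesar_cipher_decode text)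

-- ===== LEMMAS AND PROOFS =====

-- foldl that appends one element per input element is a map
lemma foldl_append_singleton {α β : Type} (f : α → β) (l : List α) (acc : List β) :
    l.foldl (fun r x => r ++ [f x]) acc = acc ++ l.map f := by
  induction l generalizing acc with
  | nil => simp
  | cons x xs ih => simp [List.foldl, ih]

-- A's inner loop equals filter-then-map
lemma inner_loop_eq {p : Char → Bool} (g : Char → Char) (l : List Char) (acc : List Char) :
    l.foldl (fun r c => if p c then r ++ [g c] else r) acc
      = acc ++ (l.filter p).map g := by
  induction l generalizing acc with
  | nil => simp
  | cons x xs ih =>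
    by_cases h : p x <;> simp [List.foldl, h, ih]

-- the concrete range 0..25 as a map over List.range
lemma pyRange_26 : PySem.List.pyRange 0 26 1 = List.map Int.ofNat (List.range 26) := by
  decide

-- one translation step on a lowercase letter, by exhausting the 26 cases
lemma translate_step : ∀ m : Nat, m < 26 →
    pvTranslate (Char.ofNat (97 + m)) = Char.ofNat (97 + (m + 25) % 26) := by
  decide

-- pvRows unrolls to the iterates of the translation step
lemma pvRows_eq : ∀ (k : Nat) (row : List Char),
    pvRows k row = (List.range k).map (fun i => String.mk (row.map pvTranslate^[i])) := by
  intro k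
  induction k with
  | zero => intro row; simp [pvRows]
  | succ k ih =>
    intro row
    rw [pvRows, ih, List.range_succ_eq_map]
    simp only [List.map_cons, List.map_map, Function.iterate_zero, List.map_id]
    congr 1

-- i translation steps on a lowercase letter shift it down by i (mod 26)
lemma translate_iterate (c : Char) (ha : 'a' ≤ c) (hz : c ≤ 'z') : ∀ i : Nat,
    pvTranslate^[i] c = Char.ofNat (97 + (c.toNat - 97 + 25 * i) % 26) := by
  have h1 : 97 ≤ c.toNat := ha
  have h2 : c.toNat ≤ 122 := hz
  intro i
  induction i with
  | zero =>
    have : (c.toNat - 97 + 25 * 0) % 26 = c.toNat - 97 := by omega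
    rw [Function.iterate_zero_apply, this]
    have : 97 + (c.toNat - 97) = c.toNat := by omega
    rw [this, Char.ofNat_toNat]
  | succ i ih =>
    rw [Function.iterate_succ_apply', ih,
      translate_step ((c.toNat - 97 + 25 * i) % 26) (Nat.mod_lt _ (by omega))]
    congr 1
    omega

-- A's per-character arithmetic equals the same closed form
lemma achar_eq (c : Char) (ha : 'a' ≤ c) (hz : c ≤ 'z') (k : Nat) (hk : k < 26) :
    Char.ofNat ((if (c.toNat : Int) - (k : Int) < 97 then (c.toNat : Int) - (k : Int) + 26
                 else (c.toNat : Int) - (k : Int))).toNat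
      = Char.ofNat (97 + (c.toNat - 97 + 25 * k) % 26) := by
  have h1 : 97 ≤ c.toNat := ha
  have h2 : c.toNat ≤ 122 := hz
  congr 1
  split_ifs with h <;> omega

-- ===== VERDICT (by name: the statement is the Claim_ definition above) =====
theorem caesar_cipher_decode_spec : Claim_equal_caesar_cipher_decode := by
  intro text _
  unfold Spec_caesar_cipher_decode caesar_cipher_decode caesar_cipher_decode_alt
  rw [foldl_append_singleton, List.nil_append, pyRange_26, pvRows_eq]
  rw [List.map_map]
  apply List.map_congr_left
  intro k hk
  rw [List.mem_range] at hk
  simp only [Function.comp_apply]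
  have h := inner_loop_eq (p := fun c => decide ('a' ≤ c ∧ c ≤ 'z'))
    (g := fun ch => Char.ofNat (if (ch.toNat : Int) - Int.ofNat k < 97
      then (ch.toNat : Int) - Int.ofNat k + 26 else (ch.toNat : Int) - Int.ofNat k).toNat)
    text.toList []
  simp only [decide_eq_true_eq] at h
  rw [h, List.nil_append]
  congr 1
  apply List.map_congr_left
  intro c hc
  rw [List.mem_filter] at hc
  obtain ⟨-, hlz⟩ := hc
  rw [decide_eq_true_eq] at hlz
  rw [translate_iterate c hlz.1 hlz.2 k]
  exact achar_eq c hlz.1 hlz.2 k hk
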